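-- pv_equiv track=rewrite | github.com/yannickb14/BestBlockBreaker | src/Agents/greedy_agent.py | count_empty_contiguous_block
-- ===== SOURCE A (Python) =====
-- def count_empty_contiguous_block(line):
--     cur_dist = 0
--     min_dist_to_clear = -1
--     for cell in line:
--         if not cell: # If empty
--             cur_dist += 1
--         else: # If filled
--             if cur_dist > min_dist_to_clear:
--                 min_dist_to_clear = cur_dist
--             cur_dist = 0
--
--     if cur_dist > min_dist_to_clear:
--         min_dist_to_clear = cur_dist
--
--     return min_dist_to_clear
-- ===== SOURCE B (Python) =====
-- def count_empty_contiguous_block(line):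
--     best = 0
--     i, n = 0, len(line)
--     while i < n:
--         if not line[i]:
--             j = i + 1
--             while j < n and not line[j]:
--                 j += 1
--             if j - i > best:
--                 best = j - i
--             i = j
--         else:
--             i += 1
--     return best
-- ===== Notes on version B (the rewrite author's own statement) =====
-- stated objective: alternative
-- what changed: Replaces A's single pass threading a running counter and a best-so-far pair through every cell with a two-pointer run scanner that jumps over each maximal block of empty cells at once and reduces over whole runs.
import Mathlib
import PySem

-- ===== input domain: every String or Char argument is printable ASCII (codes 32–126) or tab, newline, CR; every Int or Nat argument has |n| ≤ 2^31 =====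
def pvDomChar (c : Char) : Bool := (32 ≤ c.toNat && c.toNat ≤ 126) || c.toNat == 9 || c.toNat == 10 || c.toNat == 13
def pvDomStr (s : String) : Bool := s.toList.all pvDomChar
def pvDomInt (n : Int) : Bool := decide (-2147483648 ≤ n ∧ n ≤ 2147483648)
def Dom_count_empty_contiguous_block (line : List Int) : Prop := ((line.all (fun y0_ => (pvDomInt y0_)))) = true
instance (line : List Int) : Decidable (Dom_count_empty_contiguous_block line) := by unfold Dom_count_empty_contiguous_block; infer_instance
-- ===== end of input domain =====

-- B replaces A's per-cell counter/best-pair pass with a two-pointer scanner that jumps over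
-- each maximal run of empty cells at once (alternative decomposition, same O(n) cost).


-- ===== PORT A =====
-- A's for-loop threading (cur_dist, min_dist_to_clear) through each cell; `not cell` = cell == 0
def pvALoop : List Int → Int × Int → Int × Int
  | [], st => st
  | cell :: rest, (cur, mind) =>
      pvALoop rest (if cell = 0 then (cur + 1, mind) else (0, if cur > mind then cur else mind))

def count_empty_contiguous_block (line : List Int) : Int :=
  let st := pvALoop line (0, -1)
  if st.1 > st.2 then st.1 else st.2

-- ===== PORT B =====
-- length of the leading run of zeros (B's inner `while j < n and not line[j]` scan)
def pvZeroRun : List Int → Nat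
  | [] => 0
  | x :: xs => if x = 0 then pvZeroRun xs + 1 else 0

-- B's outer while loop over the remaining suffix, carrying `best`
def pvBGo : List Int → Int → Int
  | [], best => best
  | x :: xs, best =>
      if x = 0 then
        let j := pvZeroRun xs
        let len : Int := 1 + (j : Int)
        pvBGo (xs.drop j) (if len > best then len else best)
      else pvBGo xs best
termination_by xs _ => xs.length
decreasing_by
  · simp only [List.length_drop, List.length_cons]; omega
  · simp

def count_empty_contiguous_block_alt (line : List Int) : Int := pvBGo line 0

-- ===== PRECONDITION & SPEC =====
def Spec_count_empty_contiguous_block (line : List Int) (out : Int) : Prop := out = count_empty_contiguous_block_alt line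
instance (line : List Int) (out : Int) : Decidable (Spec_count_empty_contiguous_block line out) := by unfold Spec_count_empty_contiguous_block; infer_instance

-- ===== CLAIM (what is proved, stated in full; the proofs are below) =====
def Claim_equal_count_empty_contiguous_block : Prop := ∀ (line : List Int), Dom_count_empty_contiguous_block line → Spec_count_empty_contiguous_block line (count_empty_contiguous_block line)

-- ===== LEMMAS AND PROOFS =====

-- final value of A starting from state (cur, mind)
def pvAFin (xs : List Int) (cur mind : Int) : Int :=
  let st := pvALoop xs (cur, mind)
  if st.1 > st.2 then st.1 else st.2

-- unfolding equations, kept with Python's `>` orientation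
theorem pvALoop_zero (xs : List Int) (cur mind : Int) :
    pvALoop ((0 : Int) :: xs) (cur, mind) = pvALoop xs (cur + 1, mind) := by
  rw [pvALoop, if_pos rfl]

theorem pvALoop_ne {x : Int} (hx : x ≠ 0) (xs : List Int) (cur mind : Int) :
    pvALoop (x :: xs) (cur, mind) = pvALoop xs (0, if cur > mind then cur else mind) := by
  rw [pvALoop, if_neg hx]

theorem pvZeroRun_zero (xs : List Int) : pvZeroRun ((0 : Int) :: xs) = pvZeroRun xs + 1 := by
  rw [pvZeroRun, if_pos rfl]

theorem pvZeroRun_ne {x : Int} (hx : x ≠ 0) (xs : List Int) : pvZeroRun (x :: xs) = 0 := by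
  rw [pvZeroRun, if_neg hx]

theorem pvBGo_nil (best : Int) : pvBGo [] best = best := by rw [pvBGo]

theorem pvBGo_zero (xs : List Int) (best : Int) :
    pvBGo ((0 : Int) :: xs) best
      = pvBGo (xs.drop (pvZeroRun xs))
          (if 1 + (pvZeroRun xs : Int) > best then 1 + (pvZeroRun xs : Int) else best) := by
  rw [pvBGo, if_pos rfl]

theorem pvBGo_ne {x : Int} (hx : x ≠ 0) (xs : List Int) (best : Int) :
    pvBGo (x :: xs) best = pvBGo xs best := by
  rw [pvBGo, if_neg hx]

-- A's loop consumes a leading zero-run by adding its length to cur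
theorem pvALoop_run (xs : List Int) : ∀ cur mind : Int,
    pvALoop xs (cur, mind) = pvALoop (xs.drop (pvZeroRun xs)) (cur + (pvZeroRun xs : Int), mind) := by
  induction xs with
  | nil => intro cur mind; simp [pvZeroRun]
  | cons x xs ih =>
    intro cur mind
    by_cases hx : x = 0
    · subst hx
      rw [pvALoop_zero, ih (cur + 1) mind, pvZeroRun_zero, List.drop_succ_cons]
      congr 1
      push_cast
      ring_nf
    · rw [pvZeroRun_ne hx]
      simp

-- after dropping the leading zero-run, the list is empty or starts with a nonzero cell
theorem pvDrop_run (xs : List Int) :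
    xs.drop (pvZeroRun xs) = [] ∨ ∃ y ys, xs.drop (pvZeroRun xs) = y :: ys ∧ y ≠ 0 := by
  induction xs with
  | nil => left; simp [pvZeroRun]
  | cons x xs ih =>
    by_cases hx : x = 0
    · subst hx; rw [pvZeroRun_zero, List.drop_succ_cons]; exact ih
    · right; exact ⟨x, xs, by rw [pvZeroRun_ne hx]; rfl, hx⟩

-- the -1 initial best behaves like 0 once cur ≥ 0
theorem pvAFin_neg (xs : List Int) : ∀ cur : Int, 0 ≤ cur → pvAFin xs cur (-1) = pvAFin xs cur 0 := by
  induction xs with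
  | nil =>
    intro cur hc
    simp only [pvAFin, pvALoop]
    rcases lt_or_eq_of_le hc with h | h
    · rw [if_pos (by omega), if_pos (by omega)]
    · rw [if_pos (by omega), if_neg (by omega)]; omega
  | cons x xs ih =>
    intro cur hc
    by_cases hx : x = 0
    · subst hx
      simpa only [pvAFin, pvALoop_zero] using ih (cur + 1) (by omega)
    · simp only [pvAFin, pvALoop_ne hx]
      have h12 : (if cur > -1 then cur else (-1 : Int)) = (if cur > 0 then cur else 0) := by
        split_ifs <;> omega
      rw [h12]

-- main invariant: with cur = 0 and best ≥ 0, A's remainder equals B's remainder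
theorem pvMain : ∀ (n : Nat) (xs : List Int) (best : Int), xs.length ≤ n → 0 ≤ best →
    pvAFin xs 0 best = pvBGo xs best := by
  intro n
  induction n with
  | zero =>
    intro xs best hlen _
    have hnil : xs = [] := List.eq_nil_of_length_eq_zero (Nat.le_zero.mp hlen)
    subst hnil
    simp only [pvAFin, pvALoop, pvBGo_nil]
    rw [if_neg (by omega)]
  | succ n ih =>
    intro xs best hlen hb
    match xs with
    | [] =>
      simp only [pvAFin, pvALoop, pvBGo_nil]
      rw [if_neg (by omega)]
    | x :: xs =>
      by_cases hx : x = 0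
      · subst hx
        set j := pvZeroRun xs with hj
        have hrun : pvALoop ((0 : Int) :: xs) (0, best) = pvALoop (xs.drop j) (1 + (j : Int), best) := by
          rw [pvALoop_zero]
          norm_num
          rw [pvALoop_run xs 1 best, ← hj]
        rcases pvDrop_run xs with hempty | ⟨y, ys, hys, hy⟩
        · rw [← hj] at hempty
          simp only [pvAFin]
          rw [hrun, hempty, pvBGo_zero, ← hj, hempty, pvBGo_nil]
          rfl
        · rw [← hj] at hys
          have hylen : ys.length ≤ n := by
            have h1 : (xs.drop j).length ≤ xs.length := by
              rw [List.length_drop]; omega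
            rw [hys] at h1
            simp only [List.length_cons] at hlen h1 ⊢
            omega
          have hb' : 0 ≤ (if 1 + (j : Int) > best then 1 + (j : Int) else best) := by
            split <;> omega
          calc pvAFin ((0 : Int) :: xs) 0 best
              = pvAFin ys 0 (if 1 + (j : Int) > best then 1 + (j : Int) else best) := by
                simp only [pvAFin, hrun, hys, pvALoop_ne hy]
            _ = pvBGo ys (if 1 + (j : Int) > best then 1 + (j : Int) else best) := ih ys _ hylen hb'
            _ = pvBGo ((0 : Int) :: xs) best := by rw [pvBGo_zero, ← hj, hys, pvBGo_ne hy]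
      · have hxslen : xs.length ≤ n := by simp only [List.length_cons] at hlen; omega
        have h1 : pvAFin (x :: xs) 0 best = pvAFin xs 0 best := by
          simp only [pvAFin, pvALoop_ne hx]
          rw [if_neg (show ¬ (0 : Int) > best by omega)]
        rw [h1, ih xs best hxslen hb, pvBGo_ne hx]

-- ===== VERDICT (by name: the statement is the Claim_ definition above) =====
theorem count_empty_contiguous_block_spec : Claim_equal_count_empty_contiguous_block := by
  intro line _
  show count_empty_contiguous_block line = count_empty_contiguous_block_alt line
  have h0 : count_empty_contiguous_block line = pvAFin line 0 (-1) := rfl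
  rw [h0, pvAFin_neg line 0 le_rfl, pvMain line.length line 0 le_rfl le_rfl]
  rfl
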